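-- pv_equiv track=rewrite | github.com/tamirat-wubie/mullu-control-plane | gateway/temporal_reapproval.py | _grant_status
-- ===== SOURCE A (Python) =====
-- def _grant_status(reasons: list[str]) -> str:
--     if "approval_scope_mismatch" in reasons:
--         return "wrong_scope"
--     if "approval_revoked" in reasons:
--         return "revoked"
--     if "approval_granted_in_future" in reasons:
--         return "future"
--     if "approval_expired" in reasons or "approval_age_exceeds_max_seconds" in reasons:
--         return "expired"
--     if any(reason in _BLOCKING_APPROVAL_REASONS or reason.endswith("_invalid") for reason in reasons):
--         return "blocked"
--     return "valid"
--
-- _BLOCKING_APPROVAL_REASONS = frozenset(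
--     {
--         "approval_tenant_mismatch",
--         "granted_at_required",
--         "expires_at_required",
--         "approval_expiry_required",
--         "approval_evidence_refs_required",
--     }
-- )
-- ===== SOURCE B (Python) =====
-- _BLOCKING_APPROVAL_REASONS = frozenset(
--     {
--         "approval_tenant_mismatch",
--         "granted_at_required",
--         "expires_at_required",
--         "approval_expiry_required",
--         "approval_evidence_refs_required",
--     }
-- )
--
-- _LABELS = ["wrong_scope", "revoked", "future", "expired", "blocked", "valid"]
--
-- def _rank(reason: str) -> int:
--     if reason == "approval_scope_mismatch":
--         return 0
--     if reason == "approval_revoked":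
--         return 1
--     if reason == "approval_granted_in_future":
--         return 2
--     if reason in ("approval_expired", "approval_age_exceeds_max_seconds"):
--         return 3
--     if reason in _BLOCKING_APPROVAL_REASONS or reason.endswith("_invalid"):
--         return 4
--     return 5
--
-- def _grant_status(reasons: list[str]) -> str:
--     best = 5
--     for reason in reasons:
--         best = min(best, _rank(reason))
--     return _LABELS[best]
-- ===== Notes on version B (the rewrite author's own statement) =====
-- stated objective: alternative
-- what changed: Replaces A's five short-circuiting scans over the list with a single pass that maps each reason to a priority rank and keeps the running minimum, translating the best rank into its label at the end.
import Mathlib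
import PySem

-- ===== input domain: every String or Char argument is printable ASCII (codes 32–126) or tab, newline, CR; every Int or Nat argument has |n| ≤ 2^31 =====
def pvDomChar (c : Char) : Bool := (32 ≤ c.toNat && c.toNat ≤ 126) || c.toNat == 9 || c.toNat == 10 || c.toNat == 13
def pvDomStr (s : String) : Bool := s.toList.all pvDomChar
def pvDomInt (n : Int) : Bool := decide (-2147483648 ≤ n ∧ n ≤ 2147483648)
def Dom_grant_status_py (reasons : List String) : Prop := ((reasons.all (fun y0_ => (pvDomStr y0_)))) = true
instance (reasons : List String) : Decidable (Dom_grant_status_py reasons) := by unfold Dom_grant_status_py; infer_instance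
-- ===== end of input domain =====

-- B replaces A's five short-circuiting scans with one pass keeping a minimum priority rank (alternative decomposition, same cost class).

-- ===== PORT A =====
-- _BLOCKING_APPROVAL_REASONS (a frozenset of literals; shared by both sources)
def pvBlocking : PySem.Set String :=
  PySem.Set.ofList ["approval_tenant_mismatch", "granted_at_required", "expires_at_required",
                    "approval_expiry_required", "approval_evidence_refs_required"]

def grant_status_py (reasons : List String) : String :=
  if "approval_scope_mismatch" ∈ reasons then "wrong_scope"
  else if "approval_revoked" ∈ reasons then "revoked"
  else if "approval_granted_in_future" ∈ reasons then "future"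
  else if "approval_expired" ∈ reasons ∨ "approval_age_exceeds_max_seconds" ∈ reasons then "expired"
  else if reasons.any (fun reason =>
      PySem.Set.contains pvBlocking reason || PySem.Str.endswith reason "_invalid") then "blocked"
  else "valid"

-- ===== PORT B =====
def pvLabels : List String := ["wrong_scope", "revoked", "future", "expired", "blocked", "valid"]

def pvRank (reason : String) : Nat :=
  if reason = "approval_scope_mismatch" then 0
  else if reason = "approval_revoked" then 1
  else if reason = "approval_granted_in_future" then 2
  else if reason = "approval_expired" ∨ reason = "approval_age_exceeds_max_seconds" then 3
  else if PySem.Set.contains pvBlocking reason || PySem.Str.endswith reason "_invalid" then 4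
  else 5

def grant_status_py_alt (reasons : List String) : String :=
  pvLabels.getD (reasons.foldl (fun best reason => min best (pvRank reason)) 5) ""

-- ===== PRECONDITION & SPEC =====
def Spec_grant_status_py (reasons : List String) (out : String) : Prop := out = grant_status_py_alt reasons
instance (reasons : List String) (out : String) : Decidable (Spec_grant_status_py reasons out) := by unfold Spec_grant_status_py; infer_instance

-- ===== CLAIM (what is proved, stated in full; the proofs are below) =====
def Claim_equal_grant_status_py : Prop := ∀ (reasons : List String), Dom_grant_status_py reasons → Spec_grant_status_py reasons (grant_status_py reasons)

-- ===== LEMMAS AND PROOFS =====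

lemma fold_le_init (reasons : List String) (init : Nat) :
    reasons.foldl (fun best reason => min best (pvRank reason)) init ≤ init := by
  induction reasons generalizing init with
  | nil => simp
  | cons a t ih =>
    simp only [List.foldl_cons]
    exact le_trans (ih (min init (pvRank a))) (min_le_left _ _)

lemma fold_le_rank (reasons : List String) (r : String) :
    ∀ init : Nat, r ∈ reasons →
      reasons.foldl (fun best reason => min best (pvRank reason)) init ≤ pvRank r := by
  induction reasons with
  | nil => intro init hr; cases hr
  | cons a t ih =>
    intro init hr
    simp only [List.foldl_cons]
    rcases List.mem_cons.mp hr with h | h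
    · subst h
      exact le_trans (fold_le_init t _) (min_le_right _ _)
    · exact ih _ h

lemma fold_cases (reasons : List String) :
    ∀ init : Nat,
      reasons.foldl (fun best reason => min best (pvRank reason)) init = init ∨
      ∃ r ∈ reasons, reasons.foldl (fun best reason => min best (pvRank reason)) init = pvRank r := by
  induction reasons with
  | nil => intro init; left; rfl
  | cons a t ih =>
    intro init
    simp only [List.foldl_cons]
    rcases ih (min init (pvRank a)) with h | ⟨r, hr, h⟩
    · by_cases hm : pvRank a ≤ init
      · right; exact ⟨a, List.mem_cons_self, by rw [h]; omega⟩
      · left; rw [h]; omega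
    · right; exact ⟨r, List.mem_cons_of_mem _ hr, h⟩

lemma rank_le_four_of_pred {r : String}
    (h : (PySem.Set.contains pvBlocking r || PySem.Str.endswith r "_invalid") = true) :
    pvRank r ≤ 4 := by
  unfold pvRank; split_ifs <;> simp_all

lemma fold_eq_of (reasons : List String) (k : Nat) (hk : k ≤ 5)
    (hub : ∃ r ∈ reasons, pvRank r ≤ k)
    (hlb : ∀ r ∈ reasons, k ≤ pvRank r) :
    reasons.foldl (fun best reason => min best (pvRank reason)) 5 = k := by
  obtain ⟨r, hr, hrk⟩ := hub
  have hup : reasons.foldl (fun best reason => min best (pvRank reason)) 5 ≤ k :=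
    le_trans (fold_le_rank reasons r 5 hr) hrk
  rcases fold_cases reasons 5 with h | ⟨r', hr', h⟩
  · have := hlb r hr; omega
  · have := hlb r' hr'; omega

lemma fold_eq_five (reasons : List String)
    (hlb : ∀ r ∈ reasons, 5 ≤ pvRank r) :
    reasons.foldl (fun best reason => min best (pvRank reason)) 5 = 5 := by
  have hup := fold_le_init reasons 5
  rcases fold_cases reasons 5 with h | ⟨r, hr, h⟩
  · exact h
  · have := hlb r hr; omega

lemma main_eq (reasons : List String) : grant_status_py reasons = grant_status_py_alt reasons := by
  by_cases h0 : "approval_scope_mismatch" ∈ reasons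
  · have hb := fold_eq_of reasons 0 (by omega) ⟨_, h0, by decide⟩ (fun r hr => Nat.zero_le _)
    unfold grant_status_py grant_status_py_alt
    rw [hb, if_pos h0]; rfl
  · by_cases h1 : "approval_revoked" ∈ reasons
    · have hlb : ∀ r ∈ reasons, 1 ≤ pvRank r := by
        intro r hr
        unfold pvRank
        split_ifs with c0 c1 c2 c3 c4 <;> first | (subst c0; exact absurd hr h0) | omega
      have hb := fold_eq_of reasons 1 (by omega) ⟨_, h1, by decide⟩ hlb
      unfold grant_status_py grant_status_py_alt
      rw [hb, if_neg h0, if_pos h1]; rfl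
    · by_cases h2 : "approval_granted_in_future" ∈ reasons
      · have hlb : ∀ r ∈ reasons, 2 ≤ pvRank r := by
          intro r hr
          unfold pvRank
          split_ifs with c0 c1 c2 c3 c4 <;>
            first
              | (subst c0; exact absurd hr h0)
              | (subst c1; exact absurd hr h1)
              | omega
        have hb := fold_eq_of reasons 2 (by omega) ⟨_, h2, by decide⟩ hlb
        unfold grant_status_py grant_status_py_alt
        rw [hb, if_neg h0, if_neg h1, if_pos h2]; rfl
      · by_cases h3 : "approval_expired" ∈ reasons ∨ "approval_age_exceeds_max_seconds" ∈ reasons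
        · have hlb : ∀ r ∈ reasons, 3 ≤ pvRank r := by
            intro r hr
            unfold pvRank
            split_ifs with c0 c1 c2 c3 c4 <;>
              first
                | (subst c0; exact absurd hr h0)
                | (subst c1; exact absurd hr h1)
                | (subst c2; exact absurd hr h2)
                | omega
          have hub : ∃ r ∈ reasons, pvRank r ≤ 3 := by
            rcases h3 with h | h
            · exact ⟨_, h, by decide⟩
            · exact ⟨_, h, by decide⟩
          have hb := fold_eq_of reasons 3 (by omega) hub hlb
          unfold grant_status_py grant_status_py_alt
          rw [hb, if_neg h0, if_neg h1, if_neg h2, if_pos h3]; rfl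
        · by_cases h4 : reasons.any (fun reason =>
              PySem.Set.contains pvBlocking reason || PySem.Str.endswith reason "_invalid") = true
          · obtain ⟨r, hr, hpred⟩ := List.any_eq_true.mp h4
            have hlb : ∀ r ∈ reasons, 4 ≤ pvRank r := by
              intro r hr
              unfold pvRank
              split_ifs with c0 c1 c2 c3 c4 <;>
                first
                  | (subst c0; exact absurd hr h0)
                  | (subst c1; exact absurd hr h1)
                  | (subst c2; exact absurd hr h2)
                  | (rcases c3 with c | c <;> subst c <;>
                      [exact absurd (Or.inl hr) h3; exact absurd (Or.inr hr) h3])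
                  | omega
            have hb := fold_eq_of reasons 4 (by omega) ⟨r, hr, rank_le_four_of_pred hpred⟩ hlb
            unfold grant_status_py grant_status_py_alt
            rw [hb, if_neg h0, if_neg h1, if_neg h2, if_neg h3, if_pos h4]; rfl
          · have h4' : ∀ r ∈ reasons,
                ¬ ((PySem.Set.contains pvBlocking r || PySem.Str.endswith r "_invalid") = true) := by
              intro r hr hc
              exact h4 (List.any_eq_true.mpr ⟨r, hr, hc⟩)
            have hlb : ∀ r ∈ reasons, 5 ≤ pvRank r := by
              intro r hr
              unfold pvRank
              split_ifs with c0 c1 c2 c3 c4 <;>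
                first
                  | (subst c0; exact absurd hr h0)
                  | (subst c1; exact absurd hr h1)
                  | (subst c2; exact absurd hr h2)
                  | (rcases c3 with c | c <;> subst c <;>
                      [exact absurd (Or.inl hr) h3; exact absurd (Or.inr hr) h3])
                  | (exact absurd c4 (h4' r hr))
                  | omega
            have hb := fold_eq_five reasons hlb
            unfold grant_status_py grant_status_py_alt
            rw [hb, if_neg h0, if_neg h1, if_neg h2, if_neg h3, if_neg h4]; rfl

-- ===== VERDICT (by name: the statement is the Claim_ definition above) =====
theorem grant_status_py_spec : Claim_equal_grant_status_py := by
  intro reasons _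
  unfold Spec_grant_status_py
  exact main_eq reasons
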